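-- pv_equiv track=rewrite | github.com/yknot/adventOfCode | 2023/04_02.py | check_tickets
-- ===== SOURCE A (Python) =====
-- def check_tickets(lines):
--     multiplier = {i: 1 for i in range(len(lines))}
--
--     for i, (win, mine) in enumerate(lines):
--         mult = multiplier[i]
--         matches = 0
--         for m in mine:
--             if m in win:
--                 matches += 1
--
--         for j in range(matches):
--             multiplier[i + j + 1] += mult
--
--     return sum(multiplier.values())
-- ===== SOURCE B (Python) =====
-- def check_tickets(lines):
--     counts = [sum(1 for m in mine if m in win) for win, mine in lines]
--     totals = [0] * len(lines)
--     for i in range(len(lines) - 1, -1, -1):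
--         totals[i] = 1 + sum(totals[i + 1 : i + 1 + counts[i]])
--     return sum(totals)
-- ===== Notes on version B (the rewrite author's own statement) =====
-- stated objective: alternative
-- what changed: Replaces the forward pass that pushes copy multipliers into a dict with a reverse-order pull recurrence over a plain list (totals[i] = 1 + sum of the next counts[i] totals), summed at the end.
import Mathlib
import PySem

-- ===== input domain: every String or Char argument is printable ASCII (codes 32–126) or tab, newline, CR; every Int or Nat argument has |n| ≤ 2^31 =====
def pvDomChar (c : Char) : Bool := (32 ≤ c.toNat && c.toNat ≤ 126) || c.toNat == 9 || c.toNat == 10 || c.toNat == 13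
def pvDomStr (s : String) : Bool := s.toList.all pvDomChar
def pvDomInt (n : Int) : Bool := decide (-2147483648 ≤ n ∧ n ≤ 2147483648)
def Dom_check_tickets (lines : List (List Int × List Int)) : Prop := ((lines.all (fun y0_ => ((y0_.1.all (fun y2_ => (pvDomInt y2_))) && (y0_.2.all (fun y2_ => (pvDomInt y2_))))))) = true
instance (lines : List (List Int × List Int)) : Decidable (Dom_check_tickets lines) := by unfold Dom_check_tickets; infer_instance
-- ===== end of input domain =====

-- B replaces A's forward pass (pushing copy multipliers into a dict) by a reverse-order
-- pull recurrence over a plain list: totals[i] = 1 + sum of the next counts[i] totals.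

-- ===== PORT A =====
def check_tickets (lines : List (List Int × List Int)) : Int :=
  let multiplier : PySem.Dict Int Int :=
    (PySem.List.pyRange 0 (lines.length : Int) 1).foldl (fun d i => d.insert i 1) PySem.Dict.empty
  let final :=
    (PySem.List.enumerate lines).foldl (fun d p =>
      let i := p.1
      let win := p.2.1
      let mine := p.2.2
      let mult := d.getD i 0      -- multiplier[i]; this key is always present
      let matchcnt := mine.foldl (fun acc m => if m ∈ win then acc + 1 else acc) (0 : Int)
      -- multiplier[i + j + 1] += mult ; KeyError (key absent) excluded by Pre_
      (PySem.List.pyRange 0 matchcnt 1).foldl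
        (fun d2 j => d2.insert (i + j + 1) (d2.getD (i + j + 1) 0 + mult)) d) multiplier
  final.values.sum

-- ===== PORT B =====
-- the reverse in-place loop `totals[i] = 1 + sum(totals[i+1 : i+1+counts[i]])`
-- as structural recursion building the totals list back-to-front
def altTotals (counts : List Nat) : List Int :=
  match counts with
  | [] => []
  | c :: cs =>
    let rest := altTotals cs
    (1 + (rest.take c).sum) :: rest

def check_tickets_alt (lines : List (List Int × List Int)) : Int :=
  let counts := lines.map (fun pr => pr.2.countP (fun m => decide (m ∈ pr.1)))
  (altTotals counts).sum

-- ===== PRECONDITION & SPEC =====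
-- match count of one card (win, mine)
def mcountN (win mine : List Int) : Nat := mine.countP (fun m => decide (m ∈ win))

-- Pre_ excludes exactly the inputs where some card's matches run past the last card:
-- there A raises KeyError on `multiplier[i + j + 1] += mult`.
def Pre_check_tickets (lines : List (List Int × List Int)) : Prop :=
  ∀ k < lines.length,
    k + 1 + mcountN (lines.getD k ([], [])).1 (lines.getD k ([], [])).2 ≤ lines.length
instance (lines : List (List Int × List Int)) : Decidable (Pre_check_tickets lines) := by
  unfold Pre_check_tickets; infer_instance

def pvWitness_check_tickets : (List (List Int × List Int)) := [([1], [1]), ([], [])]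

def Spec_check_tickets (lines : List (List Int × List Int)) (out : Int) : Prop := out = check_tickets_alt lines
instance (lines : List (List Int × List Int)) (out : Int) : Decidable (Spec_check_tickets lines out) := by unfold Spec_check_tickets; infer_instance

-- ===== CLAIM (what is proved, stated in full; the proofs are below) =====
def Claim_equal_check_tickets : Prop := ∀ (lines : List (List Int × List Int)), Dom_check_tickets lines → Pre_check_tickets lines → Spec_check_tickets lines (check_tickets lines)
-- ===== LEMMAS AND PROOFS =====

-- the dict states of A's loop: keys 0..n-1 in order, values given by g
def rep (g : Int → Int) (n : Nat) : PySem.Dict Int Int :=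
  PySem.Dict.mk ((PySem.List.pyRange 0 (n : Int) 1).map (fun k => (k, g k)))

-- value function after one card's inner loop: add v on the window [a, a+c)
def bump (g : Int → Int) (a : Int) (c : Nat) (v : Int) : Int → Int :=
  fun x => if a ≤ x ∧ x < a + (c : Int) then g x + v else g x

-- the pending multipliers of the unprocessed suffix, as a list
def pendOf (g : Int → Int) (a : Int) : Nat → List Int
  | 0 => []
  | m + 1 => g a :: pendOf g (a + 1) m

-- add v to the first c entries
def addTo (ps : List Int) (c : Nat) (v : Int) : List Int :=
  match ps, c with
  | ps, 0 => ps
  | [], _ + 1 => []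
  | p :: ps, c + 1 => (p + v) :: addTo ps c v

-- reference recursion: total of cards = multiplier of head + total after pushing it forward
def fRef (ps : List Int) (cs : List Nat) : Int :=
  match ps, cs with
  | p :: ps, c :: cs => p + fRef (addTo ps c p) cs
  | _, _ => 0

def dot (ps rs : List Int) : Int :=
  match ps, rs with
  | p :: ps, r :: rs => p * r + dot ps rs
  | _, _ => 0

def countsOf (lines : List (List Int × List Int)) : List Nat :=
  lines.map (fun pr => pr.2.countP (fun m => decide (m ∈ pr.1)))

-- admissibility: no card's matches run past the end
def Adm (cs : List Nat) : Prop := ∀ j, (h : j < cs.length) → cs[j] + j + 1 ≤ cs.length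

lemma Adm_cons {c : Nat} {cs : List Nat} (h : Adm (c :: cs)) : c ≤ cs.length ∧ Adm cs := by
  constructor
  · have := h 0 (by simp)
    simpa using this
  · intro j hj
    have := h (j + 1) (by simpa using Nat.succ_lt_succ hj)
    simpa [Nat.succ_le_succ_iff] using this

lemma keys_rep (g : Int → Int) (n : Nat) :
    (rep g n).keys = PySem.List.pyRange 0 (n : Int) 1 := by
  simp [rep, PySem.Dict.keys, List.map_map, Function.comp_def]

lemma nodup_keys_rep (g : Int → Int) (n : Nat) : (rep g n).keys.Nodup := by
  rw [keys_rep]; exact PySem.List.nodup_pyRange_one 0 n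

lemma rep_getD (g : Int → Int) (n : Nat) {j : Int} (h0 : 0 ≤ j) (h1 : j < (n : Int)) :
    (rep g n).getD j 0 = g j := by
  apply PySem.Dict.getD_of_mem_items
  · simp only [rep, PySem.Dict.items]
    exact List.mem_map.2 ⟨j, by rw [PySem.List.mem_pyRange_one]; omega, rfl⟩
  · exact nodup_keys_rep g n

lemma rep_contains (g : Int → Int) (n : Nat) {k : Int} (h0 : 0 ≤ k) (h1 : k < (n : Int)) :
    (rep g n).contains k = true := by
  rw [PySem.Dict.contains_iff_mem_keys, keys_rep, PySem.List.mem_pyRange_one]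
  omega

lemma rep_insert (g : Int → Int) (n : Nat) {k : Int} (v : Int) (h0 : 0 ≤ k) (h1 : k < (n : Int)) :
    (rep g n).insert k v = rep (fun x => if x = k then v else g x) n := by
  apply PySem.Dict.ext
  rw [PySem.Dict.items_insert_of_contains _ _ (rep_contains g n h0 h1)]
  simp only [rep, PySem.Dict.items, List.map_map]
  apply List.map_congr_left
  intro x _
  by_cases hx : x = k <;> simp [hx]

lemma rep_values_sum (g : Int → Int) (n : Nat) :
    (rep g n).values.sum = (((PySem.List.pyRange 0 (n : Int) 1)).map g).sum := by
  simp [rep, PySem.Dict.values, List.map_map, Function.comp_def]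

lemma init_rep (n : Nat) :
    (PySem.List.pyRange 0 (n : Int) 1).foldl (fun d i => d.insert i 1) PySem.Dict.empty
      = rep (fun _ => 1) n := by
  apply PySem.Dict.ext
  rw [PySem.Dict.items_foldl_insert_fresh _ _ _ _ (fun a _ => PySem.Dict.contains_empty a)
    (by simpa using PySem.List.nodup_pyRange_one 0 n)]
  simp [rep, PySem.Dict.empty]

lemma rep_congr {g g' : Int → Int} (n : Nat) (h : ∀ x, 0 ≤ x → x < (n : Int) → g x = g' x) :
    rep g n = rep g' n := by
  apply PySem.Dict.ext
  simp only [rep, PySem.Dict.items]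
  apply List.map_congr_left
  intro x hx
  rw [PySem.List.mem_pyRange_one] at hx
  rw [h x hx.1 hx.2]

lemma inner_loop (g : Int → Int) (n : Nat) (mult : Int) (c : Nat) (i : Int)
    (h0 : 0 ≤ i) (h1 : i + 1 + (c : Int) ≤ (n : Int)) :
    (PySem.List.pyRange 0 (c : Int) 1).foldl
      (fun d2 j => d2.insert (i + j + 1) (d2.getD (i + j + 1) 0 + mult)) (rep g n)
      = rep (bump g (i + 1) c mult) n := by
  induction c generalizing g with
  | zero =>
    rw [show ((0 : Nat) : Int) = 0 from rfl, PySem.List.pyRange_one_eq_nil le_rfl]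
    apply rep_congr
    intro x _ _
    simp only [bump, Nat.cast_zero, add_zero]
    rw [if_neg (by omega)]
  | succ c ih =>
    rw [show ((c + 1 : Nat) : Int) = (c : Int) + 1 by push_cast; ring,
      PySem.List.pyRange_one_succ_right (by omega), List.foldl_append,
      ih g (by push_cast at h1 ⊢; omega)]
    simp only [List.foldl_cons, List.foldl_nil]
    have hk0 : (0 : Int) ≤ i + (c : Int) + 1 := by omega
    have hk1 : i + (c : Int) + 1 < (n : Int) := by push_cast at h1; omega
    rw [rep_getD _ n hk0 hk1, rep_insert _ n _ hk0 hk1]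
    have hb : bump g (i + 1) c mult (i + (c : Int) + 1) = g (i + (c : Int) + 1) := by
      simp only [bump]
      rw [if_neg (by omega)]
    rw [hb]
    apply rep_congr
    intro x _ _
    simp only [bump]
    push_cast
    by_cases hx : x = i + (c : Int) + 1
    · subst hx; rw [if_pos rfl, if_pos (by omega)]
    · rw [if_neg hx]
      by_cases hx2 : i + 1 ≤ x ∧ x < i + 1 + (c : Int)
      · rw [if_pos hx2, if_pos (by omega)]
      · rw [if_neg hx2, if_neg (by omega)]


lemma pend_congr {g g' : Int → Int} : ∀ (m : Nat) (a : Int),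
    (∀ x, a ≤ x → x < a + (m : Int) → g x = g' x) →
    pendOf g a m = pendOf g' a m := by
  intro m
  induction m with
  | zero => intro a _; rfl
  | succ m ih =>
    intro a h
    simp only [pendOf, List.cons.injEq]
    refine ⟨h a le_rfl (by push_cast; omega), ih (a + 1) ?_⟩
    intro x h1 h2
    exact h x (by omega) (by push_cast at h2 ⊢; omega)

lemma addTo_zero (v : Int) (ps : List Int) : addTo ps 0 v = ps := by
  cases ps <;> rfl

lemma pend_bump (g : Int → Int) (v : Int) : ∀ (c : Nat) (a : Int) (m : Nat), c ≤ m →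
    pendOf (bump g a c v) a m = addTo (pendOf g a m) c v := by
  intro c
  induction c with
  | zero =>
    intro a m _
    rw [addTo_zero]
    apply pend_congr
    intro x _ _
    simp only [bump, Nat.cast_zero, add_zero]
    rw [if_neg (by omega)]
  | succ c ih =>
    intro a m hc
    match m with
    | m' + 1 =>
      simp only [pendOf, addTo, List.cons.injEq]
      constructor
      · simp only [bump]
        rw [if_pos (by push_cast; omega)]
      · rw [pend_congr m' (a + 1) (g' := bump g (a + 1) c v) ?_, ih (a + 1) m' (by omega)]
        intro x h1 h2
        simp only [bump]
        push_cast
        by_cases hx : x < a + 1 + (c : Int)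
        · rw [if_pos (by omega), if_pos (by omega)]
        · rw [if_neg (by omega), if_neg (by omega)]


lemma loopA : ∀ (rest : List (List Int × List Int)) (i : Nat) (g : Int → Int) {n : Nat},
    i + rest.length = n → Adm (countsOf rest) →
    (((PySem.List.enumerate rest (i : Int)).foldl (fun d p =>
        (PySem.List.pyRange 0
            (p.2.2.foldl (fun acc m => if m ∈ p.2.1 then acc + 1 else acc) (0 : Int)) 1).foldl
          (fun d2 j => d2.insert (p.1 + j + 1) (d2.getD (p.1 + j + 1) 0 + d.getD p.1 0)) d)
      (rep g n)).values).sum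
    = (((PySem.List.pyRange 0 (i : Int) 1)).map g).sum
      + fRef (pendOf g (i : Int) rest.length) (countsOf rest) := by
  intro rest
  induction rest with
  | nil =>
    intro i g n hn _
    simp only [List.length_nil, Nat.add_zero] at hn
    subst hn
    simp only [PySem.List.enumerate_nil, List.foldl_nil, countsOf, List.map_nil, List.length_nil,
      pendOf, fRef, add_zero]
    exact rep_values_sum g i
  | cons p0 rest' ih =>
    intro i g n hn hadm
    have hlen : i + 1 + rest'.length = n := by simp at hn; omega
    obtain ⟨hc, hadm'⟩ : p0.2.countP (fun m => decide (m ∈ p0.1)) ≤ (countsOf rest').length ∧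
        Adm (countsOf rest') := Adm_cons (by simpa [countsOf] using hadm)
    simp only [countsOf, List.length_map] at hc
    rw [PySem.List.enumerate_cons, List.foldl_cons]
    have hcnt : p0.2.foldl (fun acc m => if m ∈ p0.1 then acc + 1 else acc) (0 : Int)
        = ((p0.2.countP (fun m => decide (m ∈ p0.1)) : Nat) : Int) := by
      simpa using PySem.List.foldl_count_if (fun m => decide (m ∈ p0.1)) p0.2 0
    have hi : (i : Int) < (n : Int) := by omega
    have hgd : (rep g n).getD ((i : Int), p0).1 0 = g (i : Int) :=
      rep_getD g n (by omega) hi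
    simp only [hcnt, hgd]
    rw [inner_loop g n (g (i : Int)) _ (i : Int) (by omega) (by push_cast; omega)]
    have := ih (i + 1) (bump g ((i : Int) + 1) (p0.2.countP (fun m => decide (m ∈ p0.1)))
      (g (i : Int))) hlen hadm'
    push_cast at this
    rw [this]
    -- prefix sums: the bump does not touch indices < i + 1
    rw [PySem.List.pyRange_one_succ_right (by omega), List.map_append, List.sum_append]
    have hpre : (PySem.List.pyRange 0 (i : Int) 1).map
        (bump g ((i : Int) + 1) (p0.2.countP (fun m => decide (m ∈ p0.1))) (g (i : Int)))
        = (PySem.List.pyRange 0 (i : Int) 1).map g := by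
      apply List.map_congr_left
      intro x hx
      rw [PySem.List.mem_pyRange_one] at hx
      simp only [bump]
      rw [if_neg (by omega)]
    have hat : bump g ((i : Int) + 1) (p0.2.countP (fun m => decide (m ∈ p0.1)))
        (g (i : Int)) (i : Int) = g (i : Int) := by
      simp only [bump]
      rw [if_neg (by omega)]
    rw [hpre]
    simp only [List.map_cons, List.map_nil, List.sum_cons, List.sum_nil, hat]
    rw [pend_bump g (g (i : Int)) _ ((i : Int) + 1) rest'.length hc]
    simp only [List.length_cons, pendOf, countsOf, List.map_cons, fRef]
    ring

lemma dot_addTo (v : Int) : ∀ (c : Nat) (ps rs : List Int), c ≤ ps.length → ps.length = rs.length →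
    dot (addTo ps c v) rs = dot ps rs + v * (rs.take c).sum := by
  intro c
  induction c with
  | zero => intro ps rs _ _; cases ps <;> simp [addTo]
  | succ c ih =>
    intro ps rs hc hl
    match ps, rs with
    | p :: ps, r :: rs =>
      simp only [addTo, dot, List.take_succ_cons, List.sum_cons]
      rw [ih ps rs (by simpa using hc) (by simpa using hl)]
      ring

lemma length_altTotals (cs : List Nat) : (altTotals cs).length = cs.length := by
  induction cs with
  | nil => rfl
  | cons c cs ih => simp [altTotals, ih]

lemma length_addTo (v : Int) : ∀ (c : Nat) (ps : List Int), (addTo ps c v).length = ps.length := by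
  intro c
  induction c with
  | zero => intro ps; cases ps <;> rfl
  | succ c ih => intro ps; cases ps with
    | nil => rfl
    | cons p ps => simp [addTo, ih]

lemma fRef_dot : ∀ (cs : List Nat) (ps : List Int), ps.length = cs.length → Adm cs →
    fRef ps cs = dot ps (altTotals cs) := by
  intro cs
  induction cs with
  | nil => intro ps _ _; cases ps <;> rfl
  | cons c cs ih =>
    intro ps hl hadm
    match ps with
    | p :: ps =>
      obtain ⟨hc, hadm'⟩ := Adm_cons hadm
      have hl' : ps.length = cs.length := by simpa using hl
      simp only [fRef, altTotals, dot]
      rw [ih (addTo ps c p) (by rw [length_addTo]; exact hl') hadm',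
        dot_addTo p c ps (altTotals cs) (by omega) (by rw [hl', length_altTotals])]
      ring

lemma dot_ones : ∀ (rs : List Int), dot (List.replicate rs.length 1) rs = rs.sum := by
  intro rs
  induction rs with
  | nil => rfl
  | cons r rs ih => simpa [dot, List.replicate_succ] using ih

lemma pend_ones : ∀ (n : Nat) (a : Int), pendOf (fun _ => 1) a n = List.replicate n 1 := by
  intro n
  induction n with
  | zero => intro a; rfl
  | succ n ih => intro a; simp [pendOf, List.replicate_succ, ih]

lemma pre_adm {lines : List (List Int × List Int)} (h : Pre_check_tickets lines) :
    Adm (countsOf lines) := by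
  intro j hj
  simp only [countsOf, List.length_map] at hj ⊢
  have := h j hj
  simp only [List.getElem_map]
  have hg : lines.getD j ([], []) = lines[j] := List.getD_eq_getElem lines ([], []) hj
  rw [hg] at this
  simp only [mcountN] at this
  omega

-- ===== VERDICT (by name: the statement is the Claim_ definition above) =====
theorem check_tickets_spec : Claim_equal_check_tickets := by
  intro lines _ hpre
  unfold Spec_check_tickets
  simp only [check_tickets, check_tickets_alt]
  rw [init_rep]
  have h := loopA lines 0 (fun _ => 1) (n := lines.length) (by simp) (pre_adm hpre)
  simp only [Int.natCast_zero] at h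
  rw [h]
  rw [pend_ones lines.length 0, fRef_dot (countsOf lines) _ (by simp [countsOf, length_altTotals]) (pre_adm hpre)]
  rw [show (List.replicate lines.length (1 : Int)) = List.replicate (altTotals (countsOf lines)).length 1 by
    rw [length_altTotals]; simp [countsOf]]
  rw [dot_ones]
  simp [countsOf, PySem.List.pyRange_one_eq_nil]
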